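-- pv_equiv track=rewrite | github.com/muylucir/travel-md | scripts/load_graph.py | _match_attraction_to_cities
-- ===== SOURCE A (Python) =====
-- def _match_attraction_to_cities(attr_name: str, day_cities: list[str], all_cities: list[str]) -> list[str]:
--     """Match attraction to city by checking if city name appears in attraction name.
--     Returns list of matched city names. Falls back to first city of the day."""
--     # Sort by length desc to match longest first (e.g., "체스키 크룸로프" before "체스키")
--     candidates = sorted(day_cities, key=len, reverse=True)
--     for city in candidates:
--         if city in attr_name:
--             return [city]
--     # Fallback: first city of the day
--     if day_cities:
--         return [day_cities[0]]
--     return []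
-- ===== SOURCE B (Python) =====
-- def _match_attraction_to_cities(attr_name: str, day_cities: list[str], all_cities: list[str]) -> list[str]:
--     """Match attraction to city by checking if city name appears in attraction name.
--     Returns list of matched city names. Falls back to first city of the day."""
--     # Single pass, no sort: keep the first longest matching city seen so far.
--     # A city is substring-tested only when it is strictly longer than the current
--     # best, so ties keep the earliest city, exactly like a stable longest-first scan.
--     best = None
--     for c in day_cities:
--         if (best is None or len(c) > len(best)) and c in attr_name:
--             best = c
--     if best is not None:
--         return [best]
--     # Fallback: first city of the day
--     return [day_cities[0]] if day_cities else []
-- ===== Notes on version B (the rewrite author's own statement) =====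
-- stated objective: alternative
-- what changed: Replaces sort-by-length-descending-then-scan-for-first-substring-hit with a single unsorted pass that keeps the first longest matching city, substring-testing a city only when it is strictly longer than the current best; the sort disappears and ties keep the earliest city exactly as the stable sort did.
import Mathlib
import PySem

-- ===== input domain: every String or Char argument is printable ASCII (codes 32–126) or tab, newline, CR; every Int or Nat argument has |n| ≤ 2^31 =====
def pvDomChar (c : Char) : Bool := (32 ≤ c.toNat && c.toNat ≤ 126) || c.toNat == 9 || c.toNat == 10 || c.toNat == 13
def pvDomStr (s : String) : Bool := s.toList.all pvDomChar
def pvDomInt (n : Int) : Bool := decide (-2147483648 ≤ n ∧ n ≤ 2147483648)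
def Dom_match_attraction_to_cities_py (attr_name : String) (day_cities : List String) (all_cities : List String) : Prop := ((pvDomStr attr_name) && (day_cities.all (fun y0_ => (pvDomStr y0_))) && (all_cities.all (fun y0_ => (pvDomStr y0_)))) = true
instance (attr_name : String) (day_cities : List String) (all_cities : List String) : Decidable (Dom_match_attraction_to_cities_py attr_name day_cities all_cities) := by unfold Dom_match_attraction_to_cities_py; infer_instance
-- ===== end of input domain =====

-- B replaces A's sort-by-length-descending-then-first-substring-hit with a single unsorted
-- pass keeping the first longest matching city (no sort); objective: alternative.

-- ===== PORT A =====
-- the 'for city in candidates: if city in attr_name: return [city]' loop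
def pvLoopA (attr_name : String) : List String → Option String
  | [] => none
  | city :: rest =>
      if PySem.Str.isIn city attr_name then some city else pvLoopA attr_name rest

def match_attraction_to_cities_py (attr_name : String) (day_cities : List String) (all_cities : List String) : List String :=
  let candidates := PySem.List.sorted day_cities (fun c => PySem.Str.len c) true
  match pvLoopA attr_name candidates with
  | some city => [city]
  | none =>
      match day_cities with
      | [] => []
      | c :: _ => [c]    -- 'if day_cities: return [day_cities[0]]' (guarded, in range)

-- ===== PORT B =====
-- the 'for c in day_cities: if (best is None or len(c) > len(best)) and c in attr_name: best = c' loop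
def pvLoopB (attr_name : String) (best : Option String) : List String → Option String
  | [] => best
  | c :: rest =>
      pvLoopB attr_name
        (if (match best with
             | none => true
             | some b => decide (PySem.Str.len b < PySem.Str.len c)) && PySem.Str.isIn c attr_name
         then some c else best) rest

def match_attraction_to_cities_py_alt (attr_name : String) (day_cities : List String) (all_cities : List String) : List String :=
  match pvLoopB attr_name none day_cities with
  | some best => [best]     -- 'if best is not None: return [best]'
  | none =>
      match day_cities with
      | [] => []
      | c :: _ => [c]    -- '[day_cities[0]] if day_cities else []'

-- ===== PRECONDITION & SPEC =====
def Spec_match_attraction_to_cities_py (attr_name : String) (day_cities : List String) (all_cities : List String) (out : List String) : Prop := out = match_attraction_to_cities_py_alt attr_name day_cities all_cities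
instance (attr_name : String) (day_cities : List String) (all_cities : List String) (out : List String) : Decidable (Spec_match_attraction_to_cities_py attr_name day_cities all_cities out) := by unfold Spec_match_attraction_to_cities_py; infer_instance

-- ===== CLAIM (what is proved, stated in full; the proofs are below) =====
def Claim_equal_match_attraction_to_cities_py : Prop := ∀ (attr_name : String) (day_cities : List String) (all_cities : List String), Dom_match_attraction_to_cities_py attr_name day_cities all_cities → Spec_match_attraction_to_cities_py attr_name day_cities all_cities (match_attraction_to_cities_py attr_name day_cities all_cities)

-- ===== LEMMAS AND PROOFS =====

-- A's scan-for-first-hit is head-of-filter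
theorem pvLoopA_eq_head_filter (attr_name : String) (l : List String) :
    pvLoopA attr_name l = (l.filter (fun c => PySem.Str.isIn c attr_name)).head? := by
  induction l with
  | nil => rfl
  | cons c rest ih =>
      rw [pvLoopA, List.filter_cons]
      by_cases h : PySem.Str.isIn c attr_name = true
      · rw [if_pos h, if_pos h, List.head?_cons]
      · rw [if_neg h, if_neg h, ih]

-- proof-side name for the 'keep the larger, first wins ties' step
def pvMaxStep (b : Option String) (c : String) : Option String :=
  match b with
  | none => some c
  | some m => if PySem.Str.len m < PySem.Str.len c then some c else some m

-- B's pruned loop is the max-step fold over the filtered list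
theorem pvLoopB_eq_foldl_filter (attr_name : String) :
    ∀ (l : List String) (b : Option String),
      pvLoopB attr_name b l
        = (l.filter (fun c => PySem.Str.isIn c attr_name)).foldl pvMaxStep b := by
  intro l
  induction l with
  | nil => intro b; rfl
  | cons c t ih =>
      intro b
      rw [show pvLoopB attr_name b (c :: t)
            = pvLoopB attr_name
                (if (match b with
                     | none => true
                     | some bb => decide (PySem.Str.len bb < PySem.Str.len c)) && PySem.Str.isIn c attr_name
                 then some c else b) t from rfl,
          List.filter_cons]
      by_cases hp : PySem.Str.isIn c attr_name = true
      · have hp' : PySem.Chars.isIn c.toList attr_name.toList = true := by simpa using hp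
        rw [if_pos hp, List.foldl_cons, ih]
        congr 1
        cases b with
        | none => simp [pvMaxStep, hp']
        | some m => simp [pvMaxStep, hp']
      · have hp' : PySem.Chars.isIn c.toList attr_name.toList = false := by simpa using hp
        rw [if_neg hp, ih]
        congr 1
        cases b <;> simp [hp']

-- the max-step fold from none is Python's max(ms, key=len) (first maximal element)
theorem foldl_pvMaxStep_eq_max? (ms : List String) :
    ms.foldl pvMaxStep none = PySem.List.max? ms (fun c => PySem.Str.len c) := by
  simp only [PySem.List.max?]
  apply List.foldl_ext
  intro b c _
  cases b with
  | none => rfl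
  | some m => rfl

-- inserting an element strictly larger (by key) than everything goes to the front
theorem insertBy_front {α : Type} (key : α → Int) (x : α) (l : List α)
    (hl : ∀ z ∈ l, key z < key x) :
    PySem.List.insertBy (fun a b => decide (key b < key a)) x l = x :: l := by
  cases l with
  | nil => rfl
  | cons y ys => simp [PySem.List.insertBy, hl y (by simp)]

-- filter commutes with insertBy into a key-descending list
theorem filter_insertBy {α : Type} (key : α → Int) (p : α → Bool) (x : α) (ys : List α)
    (h : ys.Pairwise (fun a b => key b ≤ key a)) :
    (PySem.List.insertBy (fun a b => decide (key b < key a)) x ys).filter p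
      = if p x then PySem.List.insertBy (fun a b => decide (key b < key a)) x (ys.filter p)
        else ys.filter p := by
  induction ys with
  | nil =>
      by_cases hx : p x <;> simp [PySem.List.insertBy, hx]
  | cons y ys ih =>
      have hle : ∀ z ∈ ys, key z ≤ key y := fun z hz => (List.pairwise_cons.mp h).1 z hz
      have htail := (List.pairwise_cons.mp h).2
      by_cases hlt : key y < key x
      · -- x inserted at the front
        rw [show PySem.List.insertBy (fun a b => decide (key b < key a)) x (y :: ys)
              = x :: y :: ys by simp [PySem.List.insertBy, hlt]]
        by_cases hx : p x
        · rw [if_pos hx]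
          have hfront : PySem.List.insertBy (fun a b => decide (key b < key a)) x
              ((y :: ys).filter p) = x :: (y :: ys).filter p := by
            apply insertBy_front
            intro z hz
            have hz' := List.mem_of_mem_filter hz
            rcases List.mem_cons.mp hz' with rfl | hz''
            · exact hlt
            · exact lt_of_le_of_lt (hle z hz'') hlt
          rw [hfront, List.filter_cons, if_pos hx]
        · simp [List.filter_cons, hx]
      · -- x goes past y
        rw [show PySem.List.insertBy (fun a b => decide (key b < key a)) x (y :: ys)
              = y :: PySem.List.insertBy (fun a b => decide (key b < key a)) x ys by
            simp [PySem.List.insertBy, hlt]]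
        by_cases hx : p x
        · by_cases hy : p y
          · rw [List.filter_cons, if_pos hy, List.filter_cons, if_pos hy, if_pos hx,
                show PySem.List.insertBy (fun a b => decide (key b < key a)) x
                  (y :: ys.filter p) = y :: PySem.List.insertBy (fun a b => decide (key b < key a)) x (ys.filter p) from by
                  simp [PySem.List.insertBy, hlt]]
            rw [ih htail, if_pos hx]
          · simp [hy, ih htail, hx]
        · simp [List.filter_cons, ih htail, hx]

-- one sort step: sorting l ++ [x] inserts x into the sorted l
theorem sorted_rev_append_singleton {α : Type} (key : α → Int) (l : List α) (x : α) :
    PySem.List.sorted (l ++ [x]) key true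
      = PySem.List.insertBy (fun a b => decide (key b < key a)) x (PySem.List.sorted l key true) := by
  rw [PySem.List.sorted_rev_eq_foldl_insertBy, PySem.List.sorted_rev_eq_foldl_insertBy,
      List.foldl_append, List.foldl_cons, List.foldl_nil]

-- a stable descending sort commutes with filter
theorem filter_sorted (key : String → Int) (p : String → Bool) (xs : List String) :
    (PySem.List.sorted xs key true).filter p = PySem.List.sorted (xs.filter p) key true := by
  induction xs using List.reverseRecOn with
  | nil => rfl
  | append_singleton xs x ih =>
      rw [sorted_rev_append_singleton,
          filter_insertBy key p x _ (PySem.List.sorted_pairwise_rev xs key),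
          List.filter_append]
      by_cases hx : p x
      · rw [if_pos hx, ih, show List.filter p [x] = [x] from by simp [hx],
            sorted_rev_append_singleton]
      · rw [if_neg hx, ih, show List.filter p [x] = ([] : List String) from by simp [hx],
            List.append_nil]

-- the head of the stable descending sort is the first maximal element
theorem head_sorted_rev_eq_max? (key : String → Int) (ys : List String) :
    (PySem.List.sorted ys key true).head? = PySem.List.max? ys key := by
  induction ys using List.reverseRecOn with
  | nil => rfl
  | append_singleton ys x ih =>
      rw [sorted_rev_append_singleton]
      cases hsy : PySem.List.sorted ys key true with
      | nil =>
          have h0 : PySem.List.max? ys key = none := by rw [← ih, hsy]; rfl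
          have hax : PySem.List.max? (ys ++ [x]) key = some x := by
            simp only [PySem.List.max?] at h0 ⊢
            rw [List.foldl_append, h0]
            rfl
          rw [hax]
          simp [PySem.List.insertBy]
      | cons m t =>
          have h0 : PySem.List.max? ys key = some m := by rw [← ih, hsy]; rfl
          have hax : PySem.List.max? (ys ++ [x]) key
              = if key m < key x then some x else some m := by
            simp only [PySem.List.max?] at h0 ⊢
            rw [List.foldl_append, h0]
            rfl
          rw [hax]
          by_cases hlt : key m < key x
          · simp [PySem.List.insertBy, hlt]
          · simp [PySem.List.insertBy, hlt]

-- ===== VERDICT (by name: the statement is the Claim_ definition above) =====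
theorem match_attraction_to_cities_py_spec : Claim_equal_match_attraction_to_cities_py := by
  intro attr_name day_cities all_cities _hdom
  show match_attraction_to_cities_py attr_name day_cities all_cities
      = match_attraction_to_cities_py_alt attr_name day_cities all_cities
  unfold match_attraction_to_cities_py match_attraction_to_cities_py_alt
  rw [pvLoopB_eq_foldl_filter, foldl_pvMaxStep_eq_max?]
  simp only [pvLoopA_eq_head_filter, filter_sorted, head_sorted_rev_eq_max?]
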